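-- pv_equiv track=rewrite | github.com/marinacler/MTLS | Projects/general_scripts/parser_module.py | input_for_training
-- ===== SOURCE A (Python) =====
-- def input_for_training(dictionary,slidwindow):
--     protsfortraining=dictionary.keys()
--     traininginput=[]
--     trainingoutput=[]
--     flankingseq= [0, 0, 0, 0, 0, 0, 0, 0, 0, 0, 0, 0, 0, 0, 0, 0, 0, 0, 0, 0]
--     for proteins in protsfortraining:
--         flankinglist=[]
--         for i in range(int(slidwindow/2)):
--             flankinglist=[flankingseq]+flankinglist
--         flankinglist=flankinglist+(dictionary.get(proteins)[0])
--         for i in range(int(slidwindow/2)):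
--             flankinglist=flankinglist+[flankingseq]
--         features=dictionary.get(proteins)[1]
--
--         for j in range(int(slidwindow/2),(len(flankinglist)-int(slidwindow/2))):
--             slidingsequence=flankinglist[(j-int(slidwindow/2)):(j+int(slidwindow/2)+1)]
--             flat_list = [item for sublist in slidingsequence for item in sublist]
--             traininginput.append(flat_list)
--             trainingoutput.append(features[j-int(slidwindow/2)])
--     return traininginput, trainingoutput
-- ===== SOURCE B (Python) =====
-- def input_for_training(dictionary, slidwindow):
--     half = int(slidwindow / 2)
--     flankingseq = [0] * 20
--     traininginput = []
--     trainingoutput = []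
--     for p in dictionary:
--         seq = dictionary[p][0]
--         features = dictionary[p][1]
--         n = len(seq)
--         for i in range(n):
--             row = []
--             for k in range(i - half, i + half + 1):
--                 row.extend(seq[k] if 0 <= k < n else flankingseq)
--             traininginput.append(row)
--             trainingoutput.append(features[i])
--     return traininginput, trainingoutput
-- ===== Notes on version B (the rewrite author's own statement) =====
-- stated objective: simpler
-- what changed: B drops A's padded flanking list, its two padding loops and the slice-then-flatten step, and instead builds each centered window directly with one boundary-checked loop over offsets around position i.
import Mathlib
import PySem

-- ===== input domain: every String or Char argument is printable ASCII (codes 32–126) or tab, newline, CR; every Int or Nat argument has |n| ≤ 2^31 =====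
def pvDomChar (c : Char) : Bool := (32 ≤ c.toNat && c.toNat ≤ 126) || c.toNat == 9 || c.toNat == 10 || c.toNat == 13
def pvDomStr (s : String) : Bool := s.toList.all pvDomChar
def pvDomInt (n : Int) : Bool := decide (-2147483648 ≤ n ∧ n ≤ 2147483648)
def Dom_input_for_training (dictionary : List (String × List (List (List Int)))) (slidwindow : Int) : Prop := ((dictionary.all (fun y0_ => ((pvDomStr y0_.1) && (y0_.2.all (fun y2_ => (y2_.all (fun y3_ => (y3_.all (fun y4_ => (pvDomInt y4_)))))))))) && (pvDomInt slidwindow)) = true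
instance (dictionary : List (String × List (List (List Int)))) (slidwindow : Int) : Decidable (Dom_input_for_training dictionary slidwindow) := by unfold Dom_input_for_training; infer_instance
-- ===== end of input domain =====

-- B builds each window directly with a boundary check instead of A's padded list + slicing; objective: simpler.
-- int(slidwindow/2) is ported as PySem.Int.truncdiv slidwindow 2 (exact for |slidwindow| ≤ 2^31).

-- ===== PORT A =====
def aFlankingseq : List Int := [0, 0, 0, 0, 0, 0, 0, 0, 0, 0, 0, 0, 0, 0, 0, 0, 0, 0, 0, 0]

-- A's inner loop: for j in range(half, len(flankinglist)-half): slice, flatten, append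
def aWindows (half : Int) (flankinglist features : List (List Int))
    (acc : List (List Int) × List (List Int)) : List (List Int) × List (List Int) :=
  (PySem.List.pyRange half ((flankinglist.length : Int) - half) 1).foldl
    (fun acc j =>
      (acc.1 ++ [(PySem.List.slice flankinglist (some (j - half)) (some (j + half + 1))).flatMap id],
       acc.2 ++ [PySem.List.pyGetD features (j - half) []]))
    acc

def input_for_training (dictionary : List (String × List (List (List Int)))) (slidwindow : Int) :
    List (List Int) × List (List Int) :=
  (PySem.Dict.ofList dictionary).keys.foldl
    (fun acc proteins =>
      aWindows (PySem.Int.truncdiv slidwindow 2)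
        ((PySem.List.pyRange 0 (PySem.Int.truncdiv slidwindow 2) 1).foldl
            (fun fl _ => fl ++ [aFlankingseq])
            (((PySem.List.pyRange 0 (PySem.Int.truncdiv slidwindow 2) 1).foldl
                (fun fl _ => [aFlankingseq] ++ fl) [])
              ++ PySem.List.pyGetD (((PySem.Dict.ofList dictionary).get? proteins).getD []) 0 []))
        (PySem.List.pyGetD (((PySem.Dict.ofList dictionary).get? proteins).getD []) 1 [])
        acc)
    ([], [])

-- ===== PORT B =====
-- B's window at position i: one boundary-checked loop over offsets (row.extend(...))
def bRow (half : Int) (seq : List (List Int)) (i : Int) : List Int :=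
  (PySem.List.pyRange (i - half) (i + half + 1) 1).foldl
    (fun row k =>
      row ++ (if 0 ≤ k ∧ k < (seq.length : Int) then PySem.List.pyGetD seq k []
              else List.replicate 20 0))
    []

-- B's per-protein loop: for i in range(len(seq))
def bProtein (half : Int) (seq features : List (List Int))
    (acc : List (List Int) × List (List Int)) : List (List Int) × List (List Int) :=
  (List.range seq.length).foldl
    (fun acc (i : Nat) => (acc.1 ++ [bRow half seq (i : Int)], acc.2 ++ [PySem.List.pyGetD features (i : Int) []]))
    acc

def input_for_training_alt (dictionary : List (String × List (List (List Int)))) (slidwindow : Int) :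
    List (List Int) × List (List Int) :=
  (PySem.Dict.ofList dictionary).keys.foldl
    (fun acc p =>
      bProtein (PySem.Int.truncdiv slidwindow 2)
        (PySem.List.pyGetD (((PySem.Dict.ofList dictionary).get? p).getD []) 0 [])
        (PySem.List.pyGetD (((PySem.Dict.ofList dictionary).get? p).getD []) 1 [])
        acc)
    ([], [])

-- ===== PRECONDITION & SPEC =====
-- Pre_ excludes exactly the inputs where Python A raises IndexError (a dict value with fewer than 2 fields,
-- or a feature list shorter than its sequence) and slidwindow ≤ -2, where the truncated half-window is
-- negative and A either raises IndexError or returns windows of an accidental negative-slice shape.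
def Pre_input_for_training (dictionary : List (String × List (List (List Int)))) (slidwindow : Int) : Prop :=
  -1 ≤ slidwindow ∧
  ∀ v ∈ (PySem.Dict.ofList dictionary).values,
    2 ≤ v.length ∧ (PySem.List.pyGetD v 0 []).length ≤ (PySem.List.pyGetD v 1 []).length
instance (dictionary : List (String × List (List (List Int)))) (slidwindow : Int) : Decidable (Pre_input_for_training dictionary slidwindow) := by unfold Pre_input_for_training; infer_instance

def pvWitness_input_for_training : (List (String × List (List (List Int)))) × Int :=
  ([("p", [[[1, 2]], [[3]]])], 3)

def Spec_input_for_training (dictionary : List (String × List (List (List Int)))) (slidwindow : Int) (out : List (List Int) × List (List Int)) : Prop := out = input_for_training_alt dictionary slidwindow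
instance (dictionary : List (String × List (List (List Int)))) (slidwindow : Int) (out : List (List Int) × List (List Int)) : Decidable (Spec_input_for_training dictionary slidwindow out) := by unfold Spec_input_for_training; infer_instance

-- ===== CLAIM (what is proved, stated in full; the proofs are below) =====
def Claim_equal_input_for_training : Prop := ∀ (dictionary : List (String × List (List (List Int)))) (slidwindow : Int), Dom_input_for_training dictionary slidwindow → Pre_input_for_training dictionary slidwindow → Spec_input_for_training dictionary slidwindow (input_for_training dictionary slidwindow)

-- ===== LEMMAS AND PROOFS =====

theorem half_nonneg (s : Int) (h : -1 ≤ s) : 0 ≤ PySem.Int.truncdiv s 2 := by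
  rcases lt_or_ge s 0 with hs | hs
  · have hs1 : s = -1 := by omega
    subst hs1; decide
  · unfold PySem.Int.truncdiv
    exact Int.tdiv_nonneg hs (by decide)

-- the prepend padding loop builds 'replicate l.length x ++ acc'
theorem foldl_prepend {α β : Type} (x : α) :
    ∀ (l : List β) (acc : List α),
      l.foldl (fun fl _ => [x] ++ fl) acc = List.replicate l.length x ++ acc := by
  intro l
  induction l with
  | nil => intro acc; simp
  | cons a l ih =>
      intro acc
      simp only [List.foldl_cons, ih, List.length_cons]
      rw [List.replicate_succ']
      simp

-- the append padding loop builds 'acc ++ replicate l.length x'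
theorem foldl_postpend {α β : Type} (x : α) :
    ∀ (l : List β) (acc : List α),
      l.foldl (fun fl _ => fl ++ [x]) acc = acc ++ List.replicate l.length x := by
  intro l
  induction l with
  | nil => intro acc; simp
  | cons a l ih =>
      intro acc
      simp only [List.foldl_cons, ih, List.length_cons]
      rw [List.replicate_succ]
      simp

theorem blocks_eq (h i : Nat) (seq : List (List Int)) (hi : i < seq.length) :
    (((List.replicate h aFlankingseq ++ (seq ++ List.replicate h aFlankingseq)).drop i).take (2 * h + 1))
      = (PySem.List.pyRange ((i : Int) - (h : Int)) ((i : Int) + (h : Int) + 1) 1).map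
          (fun k => if 0 ≤ k ∧ k < (seq.length : Int) then PySem.List.pyGetD seq k []
                    else List.replicate 20 0) := by
  have hfl : aFlankingseq = List.replicate 20 0 := by decide
  apply List.ext_getElem
  · simp [PySem.List.length_pyRange_one]
    omega
  · intro m h1 h2
    simp only [List.length_take, List.length_drop, List.length_append,
      List.length_replicate] at h1
    simp only [List.getElem_take, List.getElem_drop, List.getElem_map]
    rw [PySem.List.getElem_pyRange_one]
    rcases lt_or_ge (i + m) h with hc | hc
    · rw [List.getElem_append_left (by simpa using hc)]
      rw [if_neg (by omega)]
      simp [hfl]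
    · rcases lt_or_ge (i + m) (h + seq.length) with hc2 | hc2
      · rw [List.getElem_append_right (by simpa using hc)]
        rw [List.getElem_append_left (by simp; omega)]
        rw [if_pos (by constructor <;> omega)]
        rw [PySem.List.pyGetD_eq_getElem seq [] (by omega) (by omega)]
        congr 1
        simp
        omega
      · rw [List.getElem_append_right (by simpa using hc)]
        rw [List.getElem_append_right (by simp; omega)]
        rw [if_neg (by omega)]
        simp [hfl]

-- a loop appending one element to each accumulator is two maps
theorem pair_foldl {α : Type} (l : List α) (f g : α → List Int)
    (acc : List (List Int) × List (List Int)) :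
    l.foldl (fun acc x => (acc.1 ++ [f x], acc.2 ++ [g x])) acc
      = (acc.1 ++ l.map f, acc.2 ++ l.map g) := by
  induction l generalizing acc with
  | nil => simp
  | cons a l ih => simp [ih]

theorem protein_eq (half : Int) (h0 : 0 ≤ half) (seq features : List (List Int))
    (acc : List (List Int) × List (List Int)) :
    aWindows half (List.replicate half.toNat aFlankingseq ++ (seq ++ List.replicate half.toNat aFlankingseq))
      features acc = bProtein half seq features acc := by
  obtain ⟨h, rfl⟩ : ∃ h : Nat, half = (h : Int) := ⟨half.toNat, (Int.toNat_of_nonneg h0).symm⟩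
  rw [show ((h:Int)).toNat = h from Int.toNat_natCast h]
  unfold aWindows bProtein
  rw [pair_foldl, pair_foldl (List.range seq.length)
    (fun i => bRow (h:Int) seq (i:Int)) (fun i => PySem.List.pyGetD features (i:Int) [])]
  have hlen : ((List.replicate h aFlankingseq ++ (seq ++ List.replicate h aFlankingseq)).length : Int) - (h:Int) = (h : Int) + seq.length := by
    simp; ring
  rw [hlen]
  have lenA : (PySem.List.pyRange (h:Int) ((h:Int) + (seq.length:Int)) 1).length = seq.length := by
    rw [PySem.List.length_pyRange_one]; omega
  rw [Prod.mk.injEq]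
  constructor
  · congr 1
    apply List.ext_getElem
    · simp [lenA]
    · intro k hk1 hk2
      simp only [List.getElem_map]
      rw [PySem.List.getElem_pyRange_one]
      have hk : k < seq.length := by simpa [lenA] using hk1
      rw [show (h:Int) + (k:Int) - (h:Int) = (k:Int) by ring]
      rw [show (h:Int) + (k:Int) + (h:Int) + 1 = (k:Int) + ((2*h+1 : Nat) : Int) by push_cast; ring]
      rw [PySem.List.slice_natCast_add]
      rw [blocks_eq h k seq hk]
      rw [show ((List.range seq.length)[k]' (by simpa using hk2) : Nat) = k from by simp]
      unfold bRow
      rw [PySem.List.foldl_append_eq_flatMap]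
      simp [List.flatMap_def]
  · congr 1
    apply List.ext_getElem
    · simp [lenA]
    · intro k hk1 hk2
      simp only [List.getElem_map]
      rw [PySem.List.getElem_pyRange_one]
      rw [show (h:Int) + (k:Int) - (h:Int) = (k:Int) by ring]
      congr 2
      simp

-- ===== VERDICT (by name: the statement is the Claim_ definition above) =====
theorem input_for_training_spec : Claim_equal_input_for_training := by
  intro dictionary slidwindow _ hpre
  unfold Spec_input_for_training
  obtain ⟨h1, -⟩ := hpre
  have hh : 0 ≤ PySem.Int.truncdiv slidwindow 2 := half_nonneg _ h1
  unfold input_for_training input_for_training_alt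
  apply PySem.List.foldl_congr_mem
  intro acc p _
  rw [foldl_prepend, foldl_postpend, PySem.List.length_pyRange_one]
  simp only [List.append_nil, List.append_assoc, Int.sub_zero]
  exact protein_eq _ hh _ _ _
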